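-- pv_equiv track=rewrite | github.com/itsalljustagamesoitis-ux/four-season-gardener | producer/fix-articles.py | has_sibling_links
-- ===== SOURCE A (Python) =====
-- def has_sibling_links(content: str, pipeline: list, article: dict) -> bool:
--     """Check if article links to any sibling articles."""
--     siblings = [a for a in pipeline
--                 if a["cluster"] == article["cluster"]
--                 and a["status"] == "published"
--                 and a["slug"] != article["slug"]]
--     if not siblings:
--         return True  # no siblings to link to
--     return any(f'/{s["slug"]}/' in content for s in siblings)
-- ===== SOURCE B (Python) =====
-- def has_sibling_links(content: str, pipeline: list, article: dict) -> bool: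
--     """Check if article links to any sibling articles.
--
--     Content-driven scan: collect the set of published sibling slugs once, then
--     walk the content character by character; at each '/' try to match any slug
--     followed by '/'. A instead runs one substring search per sibling.
--     """
--     slugs = {s["slug"] for s in pipeline
--              if s["cluster"] == article["cluster"]
--              and s["status"] == "published"
--              and s["slug"] != article["slug"]}
--     if not slugs:
--         return True
--     rest = content
--     while rest:
--         if rest[0] == '/' and any(rest[1:].startswith(slug + '/') for slug in slugs):
--             return True
--         rest = rest[1:]
--     return False
-- ===== Notes on version B (the rewrite author's own statement) =====
-- stated objective: alternative
-- what changed: B inverts the traversal: it builds the set of sibling slugs once and then scans the content itself character by character, matching any slug at each '/' position, instead of A's per-sibling substring search over the whole content; no-siblings still yields True.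
import Mathlib
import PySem

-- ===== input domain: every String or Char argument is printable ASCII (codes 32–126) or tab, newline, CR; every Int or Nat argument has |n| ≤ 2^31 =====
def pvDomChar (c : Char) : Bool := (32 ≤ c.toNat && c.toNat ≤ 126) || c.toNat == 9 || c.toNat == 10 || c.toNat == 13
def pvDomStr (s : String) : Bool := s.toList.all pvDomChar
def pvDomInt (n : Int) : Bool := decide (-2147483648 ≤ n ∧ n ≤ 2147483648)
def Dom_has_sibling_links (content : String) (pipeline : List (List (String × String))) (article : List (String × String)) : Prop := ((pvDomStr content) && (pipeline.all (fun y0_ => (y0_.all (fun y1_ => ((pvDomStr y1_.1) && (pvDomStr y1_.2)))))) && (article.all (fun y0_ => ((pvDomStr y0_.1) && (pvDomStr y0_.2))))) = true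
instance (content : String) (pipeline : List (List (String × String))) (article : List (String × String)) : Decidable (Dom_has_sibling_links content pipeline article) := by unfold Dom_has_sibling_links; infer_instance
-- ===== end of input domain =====

-- B inverts the traversal: it builds the set of published sibling slugs once, then scans the
-- content itself character by character, matching any slug at each '/' position, instead of
-- A's per-sibling substring search over the whole content (same result, different algorithm).

-- Python d[k] is ported as PySem.Dict.getD d k "" (first-match lookup); the "" default is
-- only reached outside Pre_, which requires the key to be present wherever it is read.

-- ===== PORT A =====
def has_sibling_links (content : String) (pipeline : List (List (String × String))) (article : List (String × String)) : Bool :=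
  let siblings := pipeline.filter (fun a =>
    PySem.Dict.getD ⟨a⟩ "cluster" "" == PySem.Dict.getD ⟨article⟩ "cluster" ""
    && PySem.Dict.getD ⟨a⟩ "status" "" == "published"
    && !(PySem.Dict.getD ⟨a⟩ "slug" "" == PySem.Dict.getD ⟨article⟩ "slug" ""))
  if siblings.isEmpty then true
  else siblings.any (fun s => PySem.Str.isIn ("/" ++ PySem.Dict.getD ⟨s⟩ "slug" "" ++ "/") content)

-- ===== PORT B =====
-- the while loop of Source B: rest runs over the suffixes of content
def slugScan (slugs : List String) : List Char → Bool
  | [] => false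
  | c :: rest =>
    if c == '/' && slugs.any (fun slug => PySem.Chars.startswith rest (slug.toList ++ ['/'])) then
      true
    else slugScan slugs rest

def has_sibling_links_alt (content : String) (pipeline : List (List (String × String))) (article : List (String × String)) : Bool :=
  let slugs : PySem.Set String := PySem.Set.ofList
    ((pipeline.filter (fun s =>
        PySem.Dict.getD ⟨s⟩ "cluster" "" == PySem.Dict.getD ⟨article⟩ "cluster" ""
        && PySem.Dict.getD ⟨s⟩ "status" "" == "published"
        && !(PySem.Dict.getD ⟨s⟩ "slug" "" == PySem.Dict.getD ⟨article⟩ "slug" ""))).map (fun s => PySem.Dict.getD ⟨s⟩ "slug" ""))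
  if slugs.isEmpty then true
  else slugScan slugs content.toList

-- ===== PRECONDITION & SPEC =====
-- Pre_ excludes exactly the inputs on which Python A raises KeyError: some element of
-- pipeline (or article) lacks a key at the moment A's comprehension would read it.
def Pre_has_sibling_links (content : String) (pipeline : List (List (String × String))) (article : List (String × String)) : Prop :=
  ∀ a ∈ pipeline,
    "cluster" ∈ a.map Prod.fst ∧ "cluster" ∈ article.map Prod.fst ∧
    (PySem.Dict.getD ⟨a⟩ "cluster" "" = PySem.Dict.getD ⟨article⟩ "cluster" "" →
      "status" ∈ a.map Prod.fst ∧
      (PySem.Dict.getD ⟨a⟩ "status" "" = "published" →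
        "slug" ∈ a.map Prod.fst ∧ "slug" ∈ article.map Prod.fst))

instance (content : String) (pipeline : List (List (String × String))) (article : List (String × String)) : Decidable (Pre_has_sibling_links content pipeline article) := by
  unfold Pre_has_sibling_links; infer_instance

def pvWitness_has_sibling_links : String × (List (List (String × String))) × (List (String × String)) :=
  ("", [[("cluster", "a"), ("status", "published"), ("slug", "s1")]],
    [("cluster", "a"), ("slug", "s2")])

def Spec_has_sibling_links (content : String) (pipeline : List (List (String × String))) (article : List (String × String)) (out : Bool) : Prop := out = has_sibling_links_alt content pipeline article
instance (content : String) (pipeline : List (List (String × String))) (article : List (String × String)) (out : Bool) : Decidable (Spec_has_sibling_links content pipeline article out) := by unfold Spec_has_sibling_links; infer_instance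

-- ===== CLAIM (what is proved, stated in full; the proofs are below) =====
def Claim_equal_has_sibling_links : Prop := ∀ (content : String) (pipeline : List (List (String × String))) (article : List (String × String)), Dom_has_sibling_links content pipeline article → Pre_has_sibling_links content pipeline article → Spec_has_sibling_links content pipeline article (has_sibling_links content pipeline article)

-- ===== LEMMAS AND PROOFS =====

-- the content scan finds exactly the slugs whose '/slug/' form is an infix of the content
theorem slugScan_iff (slugs : List String) (cs : List Char) :
    slugScan slugs cs = true ↔ ∃ slug ∈ slugs, ('/' :: slug.toList ++ ['/']) <:+: cs := by
  induction cs with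
  | nil =>
    simp only [slugScan, Bool.false_eq_true, false_iff]
    rintro ⟨slug, _, h⟩
    have := List.eq_nil_of_infix_nil h
    simp at this
  | cons c rest ih =>
    simp only [slugScan]
    by_cases hc : (c == '/' && slugs.any (fun slug => PySem.Chars.startswith rest (slug.toList ++ ['/']))) = true
    · simp only [hc, if_true, true_iff]
      rw [Bool.and_eq_true, beq_iff_eq, List.any_eq_true] at hc
      obtain ⟨hc1, slug, hmem, hpre⟩ := hc
      rw [PySem.Chars.startswith_iff] at hpre
      refine ⟨slug, hmem, List.IsPrefix.isInfix ?_⟩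
      subst hc1
      exact List.cons_prefix_cons.mpr ⟨rfl, hpre⟩
    · simp only [Bool.not_eq_true] at hc
      simp only [hc, Bool.false_eq_true, if_false, ih]
      constructor
      · rintro ⟨slug, hmem, h⟩
        exact ⟨slug, hmem, h.trans (List.suffix_cons c rest).isInfix⟩
      · rintro ⟨slug, hmem, h⟩
        rcases List.infix_cons_iff.mp h with hp | hi
        · exfalso
          obtain ⟨hc1, hrest⟩ := List.cons_prefix_cons.mp hp
          have hgood : (c == '/' && slugs.any (fun slug => PySem.Chars.startswith rest (slug.toList ++ ['/']))) = true := by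
            rw [Bool.and_eq_true, beq_iff_eq, List.any_eq_true]
            exact ⟨hc1.symm, slug, hmem, (PySem.Chars.startswith_iff _ _).mpr hrest⟩
          simp [hgood] at hc
        · exact ⟨slug, hmem, hi⟩

theorem toList_slash_wrap (x : String) : ("/" ++ x ++ "/").toList = '/' :: x.toList ++ ['/'] := by
  simp [String.toList_append]

-- ===== VERDICT (by name: the statement is the Claim_ definition above) =====
theorem has_sibling_links_spec : Claim_equal_has_sibling_links := by
  intro content pipeline article _ _
  unfold Spec_has_sibling_links has_sibling_links has_sibling_links_alt
  cases hPe : pipeline.filter (fun a =>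
      PySem.Dict.getD ⟨a⟩ "cluster" "" == PySem.Dict.getD ⟨article⟩ "cluster" ""
      && PySem.Dict.getD ⟨a⟩ "status" "" == "published"
      && !(PySem.Dict.getD ⟨a⟩ "slug" "" == PySem.Dict.getD ⟨article⟩ "slug" "")) with
  | nil => simp
  | cons p ps =>
    have hSet : (PySem.Set.ofList ((p :: ps).map (fun s => PySem.Dict.getD ⟨s⟩ "slug" ""))).isEmpty = false := by
      rw [List.isEmpty_eq_false_iff_exists_mem]
      exact ⟨PySem.Dict.getD ⟨p⟩ "slug" "", (PySem.Set.mem_ofList _ _).mpr (by simp)⟩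
    simp only [hSet, List.isEmpty_cons, Bool.false_eq_true, if_false]
    rw [Bool.eq_iff_iff, List.any_eq_true, slugScan_iff]
    constructor
    · rintro ⟨s, hmem, hin⟩
      refine ⟨PySem.Dict.getD ⟨s⟩ "slug" "", (PySem.Set.mem_ofList _ _).mpr (List.mem_map.mpr ⟨s, hmem, rfl⟩), ?_⟩
      rw [PySem.Str.isIn_iff_infix, toList_slash_wrap] at hin
      exact hin
    · rintro ⟨slug, hmem, hinf⟩
      obtain ⟨s, hs, rfl⟩ := List.mem_map.mp ((PySem.Set.mem_ofList _ _).mp hmem)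
      exact ⟨s, hs, by rw [PySem.Str.isIn_iff_infix, toList_slash_wrap]; exact hinf⟩
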